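-- pv_equiv track=rewrite | github.com/pohily/checkio | stone_wall.py | stone_wall
-- ===== SOURCE A (Python) =====
-- def stone_wall(wall):
--     wall = wall.split()
--     min_width = len(wall)
--     result = 0
--
--     for i in range(len(wall[0])):
--         width = 0
--         for index, row in enumerate(wall):
--             if row[i] == '#':
--                 width += 1
--             else:
--                 ## check for trap
--                 if index < len(wall) - 1:
--                     for y in range(1, len(wall) - index):
--                         if wall[index+y][i] == '#':
--                             width +=1
--
--
--                 ## check width
--                 if min_width > width:
--                     min_width = width
--                     result = i
--                     break
--     return result
-- ===== SOURCE B (Python) =====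
-- def stone_wall(wall):
--     rows = wall.split()
--     n = len(rows[0])
--     counts = [0] * n
--     for row in rows:
--         counts = [counts[i] + (1 if row[i] == '#' else 0) for i in range(n)]
--     best = len(rows)
--     result = 0
--     for i in range(n):
--         if counts[i] < best:
--             best = counts[i]
--             result = i
--     return result
-- ===== Notes on version B (the rewrite author's own statement) =====
-- stated objective: faster
-- what changed: A scans column-major with a break-and-trap inner loop that re-scans all rows below each non-stone cell while tracking a running minimum; B builds a per-column stone-count table in one row-major pass (touching each cell exactly once) and then selects the first column beating the running minimum in a separate pass.
import Mathlib
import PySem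

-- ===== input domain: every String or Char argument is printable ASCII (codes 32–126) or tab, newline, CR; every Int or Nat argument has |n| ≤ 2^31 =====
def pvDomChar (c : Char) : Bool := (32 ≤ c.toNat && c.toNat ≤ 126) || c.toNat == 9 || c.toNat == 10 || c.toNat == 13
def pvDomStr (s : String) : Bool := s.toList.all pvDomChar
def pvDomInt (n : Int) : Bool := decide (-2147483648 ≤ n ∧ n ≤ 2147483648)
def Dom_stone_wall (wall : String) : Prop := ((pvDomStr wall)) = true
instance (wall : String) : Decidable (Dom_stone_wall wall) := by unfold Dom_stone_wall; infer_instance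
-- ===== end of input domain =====

-- B replaces A's column-major scan (with break and a "trap" look-ahead) by a per-column
-- '#'-count table built row-major, followed by a separate first-minimum selection pass.

-- row[i] on Pre_ is always in range; out of range we return ' ' (never reached inside Pre_)
def pvCGet (r : List Char) (i : Nat) : Char := r.getD i ' '

-- ===== PORT A =====
-- inner loop of A over the remaining rows (enumerate); returns the (min_width, result)
-- state after the loop; `break` is the early return.  A's trap loop
-- 'for y in range(1, len(wall)-index)' over the rows below the current one is the foldl over
-- `rest`; its guard 'if index < len(wall)-1' is dropped because the fold over [] is already
-- the identity, exactly like the skipped empty range.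
def pvInnerA (i : Nat) (minw res : Int) : List (List Char) → Int → Int × Int
  | [], _ => (minw, res)
  | row :: rest, width =>
    if pvCGet row i = '#' then
      pvInnerA i minw res rest (width + 1)
    else
      let width' := rest.foldl (fun w r => if pvCGet r i = '#' then w + 1 else w) width
      if minw > width' then (width', (i : Int))
      else pvInnerA i minw res rest width'

def stone_wall (wall : String) : Int :=
  let rows : List (List Char) := (PySem.Str.split₀ wall).map String.toList
  let n : Nat := (rows.headD []).length
  let st := (List.range n).foldl
    (fun (st : Int × Int) i => pvInnerA i st.1 st.2 rows 0)
    ((rows.length : Int), 0)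
  st.2

-- ===== PORT B =====
def stone_wall_alt (wall : String) : Int :=
  let rows : List (List Char) := (PySem.Str.split₀ wall).map String.toList
  let n : Nat := (rows.headD []).length
  let counts : List Int := rows.foldl
    (fun cs row => (List.range n).map
      (fun i => cs.getD i 0 + (if pvCGet row i = '#' then 1 else 0)))
    (List.replicate n (0 : Int))
  let st := (List.range n).foldl
    (fun (st : Int × Int) i =>
      if counts.getD i 0 < st.1 then ((counts.getD i 0), (i : Int)) else st)
    ((rows.length : Int), 0)
  st.2

-- ===== PRECONDITION & SPEC =====
-- Exactly the inputs where A returns: the split is nonempty and no row is shorter than the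
-- first row (every column index of row 0 is probed in every row, so a shorter row raises IndexError).
def Pre_stone_wall (wall : String) : Prop :=
  (PySem.Str.split₀ wall) ≠ [] ∧
  ∀ r ∈ (PySem.Str.split₀ wall).map String.toList,
    (((PySem.Str.split₀ wall).map String.toList).headD []).length ≤ r.length

instance (wall : String) : Decidable (Pre_stone_wall wall) := by unfold Pre_stone_wall; infer_instance

def pvWitness_stone_wall : String := "##.# .#.# ###."

def Spec_stone_wall (wall : String) (out : Int) : Prop := out = stone_wall_alt wall
instance (wall : String) (out : Int) : Decidable (Spec_stone_wall wall out) := by unfold Spec_stone_wall; infer_instance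

-- ===== CLAIM (what is proved, stated in full; the proofs are below) =====
def Claim_equal_stone_wall : Prop := ∀ (wall : String), Dom_stone_wall wall → Pre_stone_wall wall → Spec_stone_wall wall (stone_wall wall)

-- ===== LEMMAS AND PROOFS =====

-- the '#'-count of column i over a list of rows
def pvCnt (rows : List (List Char)) (i : Nat) : Int :=
  rows.foldl (fun w r => if pvCGet r i = '#' then w + 1 else w) 0

lemma pvCnt_fold (rows : List (List Char)) (i : Nat) (w : Int) :
    rows.foldl (fun w r => if pvCGet r i = '#' then w + 1 else w) w = w + pvCnt rows i := by
  induction rows generalizing w with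
  | nil => simp [pvCnt]
  | cons r rest ih =>
    simp only [pvCnt, List.foldl_cons]
    rw [ih, ih (if pvCGet r i = '#' then (0:Int) + 1 else 0)]
    split_ifs <;> omega

lemma pvCnt_nonneg (rows : List (List Char)) (i : Nat) : 0 ≤ pvCnt rows i := by
  induction rows with
  | nil => simp [pvCnt]
  | cons r rest ih =>
    unfold pvCnt
    rw [List.foldl_cons, pvCnt_fold]
    split_ifs <;> omega

lemma pvCnt_cons (row : List Char) (rest : List (List Char)) (i : Nat) :
    pvCnt (row :: rest) i = (if pvCGet row i = '#' then (1:Int) else 0) + pvCnt rest i := by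
  have h : pvCnt (row :: rest) i
      = rest.foldl (fun w r => if pvCGet r i = '#' then w + 1 else w)
          (if pvCGet row i = '#' then (0:Int) + 1 else 0) := rfl
  rw [h, pvCnt_fold]
  split_ifs <;> omega

lemma pvCnt_all (rows : List (List Char)) (i : Nat)
    (hall : ∀ r ∈ rows, pvCGet r i = '#') : pvCnt rows i = (rows.length : Int) := by
  induction rows with
  | nil => simp [pvCnt]
  | cons r rs ih =>
    rw [pvCnt_cons, if_pos (hall r (by simp)), ih (fun r hr => hall r (by simp [hr]))]
    simp only [List.length_cons]
    push_cast
    omega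

-- once width ≥ minw the inner loop can never break again
lemma pvInnerA_stall (i : Nat) (minw res : Int) (rows : List (List Char)) (width : Int)
    (h : minw ≤ width) : pvInnerA i minw res rows width = (minw, res) := by
  induction rows generalizing width with
  | nil => simp [pvInnerA]
  | cons row rest ih =>
    simp only [pvInnerA]
    split_ifs with h1 h2
    · exact ih _ (by omega)
    · exfalso
      rw [pvCnt_fold] at h2
      have := pvCnt_nonneg rest i
      omega
    · rw [pvCnt_fold]
      have := pvCnt_nonneg rest i
      exact ih _ (by omega)

-- characterisation of A's inner loop: first-min comparison against the total column count
lemma pvInnerA_spec (i : Nat) (rows : List (List Char)) (minw res width : Int) :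
    pvInnerA i minw res rows width =
      if rows.any (fun r => pvCGet r i ≠ '#') then
        (if width + pvCnt rows i < minw then (width + pvCnt rows i, (i : Int)) else (minw, res))
      else (minw, res) := by
  induction rows generalizing width with
  | nil => simp [pvInnerA]
  | cons row rest ih =>
    by_cases hr : pvCGet row i = '#'
    · rw [show pvInnerA i minw res (row :: rest) width = pvInnerA i minw res rest (width + 1)
        from by simp [pvInnerA, hr]]
      rw [ih, pvCnt_cons, if_pos hr]
      have hany : ((row :: rest).any fun r => pvCGet r i ≠ '#')
          = (rest.any fun r => pvCGet r i ≠ '#') := by simp [hr]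
      rw [hany]
      have harr : width + 1 + pvCnt rest i = width + (1 + pvCnt rest i) := by omega
      rw [harr]
    · have hstep : pvInnerA i minw res (row :: rest) width =
          if minw > width + pvCnt rest i then (width + pvCnt rest i, (i : Int))
          else pvInnerA i minw res rest (width + pvCnt rest i) := by
        simp only [pvInnerA, if_neg hr]
        rw [pvCnt_fold]
      rw [hstep, pvCnt_cons, if_neg hr, zero_add]
      have hany : ((row :: rest).any fun r => pvCGet r i ≠ '#') = true := by simp [hr]
      rw [hany, if_pos rfl]
      by_cases hlt : minw > width + pvCnt rest i
      · rw [if_pos hlt, if_pos (by omega)]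
      · rw [if_neg hlt, if_neg (by omega)]
        exact pvInnerA_stall _ _ _ _ _ (by omega)

-- B's counts table holds exactly the column counts
lemma pvCounts_spec (rows : List (List Char)) (n : Nat) :
    rows.foldl
      (fun cs row => (List.range n).map
        (fun i => cs.getD i 0 + (if pvCGet row i = '#' then 1 else 0)))
      (List.replicate n (0 : Int))
    = (List.range n).map (fun i => pvCnt rows i) := by
  suffices h : ∀ (rows : List (List Char)) (cs : Nat → Int),
      rows.foldl
        (fun cs row => (List.range n).map
          (fun i => cs.getD i 0 + (if pvCGet row i = '#' then 1 else 0)))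
        ((List.range n).map cs)
      = (List.range n).map (fun i => cs i + pvCnt rows i) by
    have h0 : (List.replicate n (0:Int)) = (List.range n).map (fun _ => 0) := by
      simp [List.map_const']
    rw [h0, h rows (fun _ => 0)]
    simp
  intro rows
  induction rows with
  | nil => intro cs; simp [pvCnt]
  | cons row rest ih =>
    intro cs
    simp only [List.foldl_cons]
    have hstep : (List.range n).map
        (fun i => ((List.range n).map cs).getD i 0 + (if pvCGet row i = '#' then 1 else 0))
        = (List.range n).map (fun i => cs i + (if pvCGet row i = '#' then 1 else 0)) := by
      apply List.map_congr_left
      intro i hi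
      simp only [List.mem_range] at hi
      congr 1
      rw [List.getD_eq_getElem?_getD]
      simp [hi]
    rw [hstep, ih (fun i => cs i + (if pvCGet row i = '#' then 1 else 0))]
    apply List.map_congr_left
    intro i _
    rw [pvCnt_cons]
    split_ifs <;> omega

-- the two selection folds agree as long as the running minimum stays ≤ rows.length
lemma pvSelect_eq (rows : List (List Char)) (idxs : List Nat) (minw res : Int)
    (hminw : minw ≤ (rows.length : Int)) :
    idxs.foldl (fun (st : Int × Int) i => pvInnerA i st.1 st.2 rows 0) (minw, res)
    = idxs.foldl (fun (st : Int × Int) i =>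
        if pvCnt rows i < st.1 then (pvCnt rows i, (i : Int)) else st) (minw, res) := by
  induction idxs generalizing minw res with
  | nil => rfl
  | cons i rest ih =>
    simp only [List.foldl_cons]
    rw [pvInnerA_spec]
    by_cases ha : (rows.any fun r => pvCGet r i ≠ '#') = true
    · rw [if_pos ha]
      simp only [zero_add]
      by_cases hlt : pvCnt rows i < minw
      · rw [if_pos hlt]
        exact ih _ _ (le_trans (le_of_lt hlt) hminw)
      · rw [if_neg hlt]
        exact ih _ _ hminw
    · rw [if_neg ha]
      -- every entry of column i is '#', so pvCnt rows i = rows.length ≥ minw: B's test fails too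
      have hall : ∀ r ∈ rows, pvCGet r i = '#' := by
        intro r hr
        by_contra hne
        exact ha (List.any_eq_true.mpr ⟨r, hr, by simp [hne]⟩)
      have hcnt : pvCnt rows i = (rows.length : Int) := pvCnt_all rows i hall
      rw [if_neg (by omega)]
      exact ih _ _ hminw

-- ===== VERDICT (by name: the statement is the Claim_ definition above) =====
theorem stone_wall_spec : Claim_equal_stone_wall := by
  intro wall _ _
  unfold Spec_stone_wall stone_wall stone_wall_alt
  simp only [pvCounts_spec]
  rw [pvSelect_eq _ _ _ _ (le_refl _)]
  apply congrArg
  apply PySem.List.foldl_congr_mem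
  intro st i hi
  simp only [List.mem_range] at hi
  rw [List.getD_eq_getElem?_getD, List.getElem?_map, List.getElem?_range hi]
  rfl
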